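-- pv_equiv track=rewrite | github.com/TE23-Faysel-Alali/py-projekt | html-till-CSS-skilett-2.py | Hita_taggar_med_position
-- ===== SOURCE A (Python) =====
-- def Hita_taggar_med_position(html):
--
--     lista = []
--     index = 0
--     slut = len(html)
--
--     body_start = html.find("<body")
--
--     if body_start != -1:
--         index = body_start
--     else:
--         index = 0
--
--     while index < slut:
--
--         start = html.find("<", index)
--         if start == -1:
--             break
--
--         end = html.find(">", start)
--         if end == -1:
--             break
--
--         tag = html[start+1:end]
--         lista.append(tag)
--
--         index = end + 1
--
--     return lista
-- ===== SOURCE B (Python) =====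
-- def Hita_taggar_med_position(html):
--     i = html.find("<body")
--     start = i if i != -1 else 0
--     tags = []
--     buf = None  # None = outside a tag; list of chars = inside a tag
--     for ch in html[start:]:
--         if buf is None:
--             if ch == '<':
--                 buf = []
--         elif ch == '>':
--             tags.append(''.join(buf))
--             buf = None
--         else:
--             buf.append(ch)
--     return tags
-- ===== Notes on version B (the rewrite author's own statement) =====
-- stated objective: alternative
-- what changed: Replaces A's while loop of repeated html.find('<')/find('>') index scans with a single character-by-character state machine pass over html[start:], accumulating the current tag's characters in a buffer.
import Mathlib
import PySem

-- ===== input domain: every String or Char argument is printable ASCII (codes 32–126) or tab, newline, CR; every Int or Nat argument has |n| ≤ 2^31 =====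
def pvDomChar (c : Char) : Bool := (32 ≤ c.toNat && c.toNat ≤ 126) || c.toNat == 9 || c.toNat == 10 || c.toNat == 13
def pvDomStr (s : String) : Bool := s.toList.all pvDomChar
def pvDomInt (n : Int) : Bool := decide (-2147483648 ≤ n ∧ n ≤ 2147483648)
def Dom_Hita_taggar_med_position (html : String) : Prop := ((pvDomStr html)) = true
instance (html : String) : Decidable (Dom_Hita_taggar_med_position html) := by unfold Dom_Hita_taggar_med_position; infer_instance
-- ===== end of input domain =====

-- B replaces A's repeated html.find scans with one character-by-character state machine over html[start:] (objective: alternative, same O(n) cost).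

-- ===== PORT A =====
-- the while loop, as fuel-guarded recursion over the same state (fuel only makes it total)
def pvLoopA (s : List Char) (slut : Nat) : Nat → Int → List String → List String
  | 0, _, lista => lista
  | fuel + 1, index, lista =>
    if index < (slut : Int) then
      let start := PySem.Chars.findFrom s ['<'] index none
      if start = -1 then lista
      else
        let ende := PySem.Chars.findFrom s ['>'] start none
        if ende = -1 then lista
        else
          let tag := PySem.Chars.slice s (some (start + 1)) (some ende)
          pvLoopA s slut fuel (ende + 1) (lista ++ [String.ofList tag])
    else lista

def Hita_taggar_med_position (html : String) : List String :=
  let s := html.toList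
  let slut := s.length
  let bodyStart := PySem.Chars.find s "<body".toList
  let index : Int := if bodyStart ≠ -1 then bodyStart else 0
  pvLoopA s slut (slut + 1) index []

-- ===== PORT B =====
-- state: (tags so far, none = outside a tag / some buf = inside a tag with its chars)
def pvStepB (acc : List String × Option (List Char)) (c : Char) : List String × Option (List Char) :=
  match acc.2 with
  | none => if c = '<' then (acc.1, some []) else acc
  | some buf => if c = '>' then (acc.1 ++ [String.ofList buf], none) else (acc.1, some (buf ++ [c]))

def Hita_taggar_med_position_alt (html : String) : List String :=
  let i := PySem.Chars.find html.toList "<body".toList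
  let start : Int := if i ≠ -1 then i else 0
  let rest := PySem.Chars.slice html.toList (some start) none
  (rest.foldl pvStepB ([], none)).1

-- ===== PRECONDITION & SPEC =====
def Spec_Hita_taggar_med_position (html : String) (out : List String) : Prop := out = Hita_taggar_med_position_alt html
instance (html : String) (out : List String) : Decidable (Spec_Hita_taggar_med_position html out) := by unfold Spec_Hita_taggar_med_position; infer_instance

-- ===== CLAIM (what is proved, stated in full; the proofs are below) =====
def Claim_equal_Hita_taggar_med_position : Prop := ∀ (html : String), Dom_Hita_taggar_med_position html → Spec_Hita_taggar_med_position html (Hita_taggar_med_position html)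

-- ===== LEMMAS AND PROOFS =====

-- reference scanner: scan t st = tags emitted by the state machine started in state st on t
def pvScan : List Char → Option (List Char) → List String
  | [], _ => []
  | c :: rest, none => if c = '<' then pvScan rest (some []) else pvScan rest none
  | c :: rest, some buf => if c = '>' then String.ofList buf :: pvScan rest none else pvScan rest (some (buf ++ [c]))

theorem pvFoldB_eq (t : List Char) : ∀ (acc : List String) (st : Option (List Char)),
    (t.foldl pvStepB (acc, st)).1 = acc ++ pvScan t st := by
  induction t with
  | nil => intro acc st; simp [pvScan]
  | cons c rest ih =>
    intro acc st
    cases st with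
    | none =>
      by_cases h : c = '<' <;> simp [List.foldl, pvStepB, pvScan, h, ih]
    | some buf =>
      by_cases h : c = '>' <;> simp [List.foldl, pvStepB, pvScan, h, ih]

theorem pvScan_none_of_not_mem {t : List Char} (h : '<' ∉ t) : pvScan t none = [] := by
  induction t with
  | nil => rfl
  | cons c rest ih =>
    simp only [List.mem_cons, not_or] at h
    simp [pvScan, Ne.symm h.1, ih h.2]

theorem pvScan_some_of_not_mem {t : List Char} (buf : List Char) (h : '>' ∉ t) :
    pvScan t (some buf) = [] := by
  induction t generalizing buf with
  | nil => rfl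
  | cons c rest ih =>
    simp only [List.mem_cons, not_or] at h
    simp [pvScan, Ne.symm h.1, ih _ h.2]

theorem pvScan_none_drop (t : List Char) (j : Nat)
    (h : ∀ i, i < j → t[i]? ≠ some '<') : pvScan t none = pvScan (t.drop j) none := by
  induction j generalizing t with
  | zero => simp
  | succ j ih =>
    cases t with
    | nil => simp [pvScan]
    | cons c rest =>
      have hc : c ≠ '<' := by
        intro hc; exact h 0 (by omega) (by simp [hc])
      have := ih rest (fun i hi => by
        have := h (i + 1) (by omega); simpa using this)
      simp [pvScan, hc, this]

theorem pvScan_some_split (u : List Char) (p : Nat) (buf : List Char)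
    (hp : u[p]? = some '>') (h : ∀ i, i < p → u[i]? ≠ some '>') :
    pvScan u (some buf) = String.ofList (buf ++ u.take p) :: pvScan (u.drop (p + 1)) none := by
  induction p generalizing u buf with
  | zero =>
    cases u with
    | nil => simp at hp
    | cons c rest =>
      simp only [List.getElem?_cons_zero, Option.some.injEq] at hp
      simp [pvScan, hp]
  | succ p ih =>
    cases u with
    | nil => simp at hp
    | cons c rest =>
      have hc : c ≠ '>' := by
        intro hc; exact h 0 (by omega) (by simp [hc])
      have := ih rest (buf ++ [c]) (by simpa using hp) (fun i hi => by
        have := h (i + 1) (by omega); simpa using this)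
      simp [pvScan, hc, this]

theorem pv_singleton_prefix_iff (a : Char) (l : List Char) (i : Nat) :
    [a] <+: l.drop i ↔ l[i]? = some a := by
  constructor
  · rintro ⟨t, ht⟩
    have : (l.drop i)[0]? = some a := by rw [← ht]; simp
    simpa [List.getElem?_drop] using this
  · intro h
    have hi : i < l.length := (List.getElem?_eq_some_iff.mp h).1
    rw [List.drop_eq_getElem_cons hi]
    have : l[i] = a := by simpa [List.getElem?_eq_some_iff, hi] using h
    exact ⟨l.drop (i + 1), by simp [this]⟩

theorem pv_singleton_infix_iff (a : Char) (l : List Char) : [a] <:+: l ↔ a ∈ l := by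
  simp [List.infix_iff_prefix_suffix]
  constructor
  · rintro ⟨t, ⟨r, hr⟩, ht⟩
    have : a ∈ t := by rw [← hr]; simp
    exact ht.mem this
  · intro h
    obtain ⟨s1, s2, rfl⟩ := List.append_of_mem h
    exact ⟨a :: s2, ⟨s2, rfl⟩, ⟨s1, rfl⟩⟩

-- the main invariant: A's while loop from absolute index k produces the machine's output on s.drop k
theorem pvLoopA_eq (s : List Char) : ∀ (fuel k : Nat) (lista : List String),
    k ≤ s.length → s.length + 1 - k ≤ fuel →
    pvLoopA s s.length fuel (k : Int) lista = lista ++ pvScan (s.drop k) none := by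
  intro fuel
  induction fuel with
  | zero => intro k lista hk hf; omega
  | succ fuel ih =>
    intro k lista hk hf
    by_cases hlt : (k : Int) < (s.length : Int)
    · have hkl : k < s.length := by exact_mod_cast hlt
      rw [pvLoopA]
      simp only [if_pos hlt]
      rw [PySem.Chars.findFrom_natCast s ['<'] k hk]
      set t := s.drop k with ht
      by_cases hlt2 : PySem.Chars.find t ['<'] = -1
      · simp only [if_pos hlt2]
        simp only [if_true]
        have : '<' ∉ t := by
          have := (PySem.Chars.find_eq_neg_one_iff (s := t) (sub := ['<'])).mp hlt2
          rw [pv_singleton_infix_iff] at this; exact this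
        simp [pvScan_none_of_not_mem this]
      · simp only [if_neg hlt2]
        have hfind0 : 0 ≤ PySem.Chars.find t ['<'] := by
          have := PySem.Chars.neg_one_le_find (s := t) (sub := ['<'])
          omega
        set j : Nat := (PySem.Chars.find t ['<']).toNat with hj
        have hjval : PySem.Chars.find t ['<'] = (j : Int) := by omega
        obtain ⟨hpre, hmin⟩ := PySem.Chars.find_spec (s := t) (sub := ['<']) hfind0
        rw [pv_singleton_prefix_iff] at hpre
        have hjlt : j < t.length := (List.getElem?_eq_some_iff.mp hpre).1
        have htlen : t.length = s.length - k := by simp [ht]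
        have hkj : k + j ≤ s.length := by omega
        have hcast : (k : Int) + (j : Int) = ((k + j : Nat) : Int) := by push_cast; ring
        rw [hjval, hcast]
        rw [if_neg (by omega : ¬((k + j : Nat) : Int) = -1)]
        rw [PySem.Chars.findFrom_natCast s ['>'] (k + j) hkj]
        have hdropkj : s.drop (k + j) = t.drop j := by simp [ht, List.drop_drop]
        rw [hdropkj]
        -- skip the first j (non-'<') chars of t
        have hskip : pvScan t none = pvScan (t.drop j) none := by
          apply pvScan_none_drop
          intro i hi hcontra
          exact hmin i hi ((pv_singleton_prefix_iff '<' t i).mpr hcontra)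
        have hdj : t.drop j = '<' :: t.drop (j + 1) := by
          obtain ⟨hlt', heq⟩ := List.getElem?_eq_some_iff.mp hpre
          rw [List.drop_eq_getElem_cons hlt']
          simp [heq]
          omega
        by_cases hend : PySem.Chars.find (t.drop j) ['>'] = -1
        · simp only [if_pos hend]
          simp only [if_true]
          have hno : '>' ∉ t.drop j := by
            have := (PySem.Chars.find_eq_neg_one_iff (s := t.drop j) (sub := ['>'])).mp hend
            rw [pv_singleton_infix_iff] at this; exact this
          have hno' : '>' ∉ t.drop (j + 1) := fun hmem => hno (by
            rw [hdj]; exact List.mem_cons_of_mem _ hmem)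
          rw [hskip, hdj]
          simp [pvScan, pvScan_some_of_not_mem _ hno']
        · simp only [if_neg hend]
          have hm0 : 0 ≤ PySem.Chars.find (t.drop j) ['>'] := by
            have := PySem.Chars.neg_one_le_find (s := t.drop j) (sub := ['>'])
            omega
          set m : Nat := (PySem.Chars.find (t.drop j) ['>']).toNat with hm
          have hmval : PySem.Chars.find (t.drop j) ['>'] = (m : Int) := by omega
          obtain ⟨hpre2, hmin2⟩ := PySem.Chars.find_spec (s := t.drop j) (sub := ['>']) hm0
          rw [pv_singleton_prefix_iff] at hpre2
          have hmlt : m < (t.drop j).length := (List.getElem?_eq_some_iff.mp hpre2).1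
          -- m ≠ 0 since (t.drop j)[0] = '<'
          have hm1 : 1 ≤ m := by
            rcases Nat.eq_zero_or_pos m with h0 | h1
            · exfalso
              have : (t.drop j)[0]? = some '>' := by rw [← h0]; exact hpre2
              rw [hdj] at this; simp at this
            · exact h1
          have hc3 : ((k + j : Nat) : Int) + (m : Int) = ((k + j + m : Nat) : Int) := by push_cast; ring
          rw [hmval, hc3]
          rw [if_neg (by omega : ¬((k + j + m : Nat) : Int) = -1)]
          -- tag slice
          have hc2 : ((k + j : Nat) : Int) + 1 = ((k + j + 1 : Nat) : Int) := by push_cast; ring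
          rw [PySem.Chars.slice_eq_listSlice, hc2, PySem.List.slice_natCast]
          have hc4 : ((k + j + m : Nat) : Int) + 1 = ((k + j + m + 1 : Nat) : Int) := by push_cast; ring
          rw [hc4]
          have hkjm : k + j + m + 1 ≤ s.length := by
            have := htlen; simp [ht] at hmlt; omega
          rw [ih (k + j + m + 1) (lista ++ [String.ofList ((s.drop (k + j + 1)).take (k + j + m - (k + j + 1)))])
              hkjm (by omega)]
          -- rhs reshaping
          rw [hskip, hdj]
          simp only [pvScan, if_neg (by decide : ¬('<' : Char) = '>')]
          rw [pvScan_some_split (t.drop (j + 1)) (m - 1) []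
              (by
                have : (t.drop (j+1))[m-1]? = (t.drop j)[m]? := by
                  obtain ⟨m', hm'⟩ := Nat.exists_eq_add_of_le hm1
                  rw [hdj, hm']
                  rw [show (1 + m') - 1 = m' from by omega, show 1 + m' = m' + 1 from by omega,
                      List.getElem?_cons_succ]
                rw [this]; exact hpre2)
              (by
                intro i hi hcontra
                have : (t.drop j)[i+1]? = some '>' := by
                  rw [hdj]; simpa using hcontra
                exact hmin2 (i + 1) (by omega) ((pv_singleton_prefix_iff '>' (t.drop j) (i+1)).mpr this))]
          have hdrop1 : s.drop (k + j + 1) = t.drop (j + 1) := by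
            simp [ht, List.drop_drop]; ring_nf
          have htake : (s.drop (k + j + 1)).take (k + j + m - (k + j + 1)) = (t.drop (j + 1)).take (m - 1) := by
            rw [hdrop1]; congr 1; omega
          have hdrop2 : s.drop (k + j + m + 1) = (t.drop (j + 1)).drop ((m - 1) + 1) := by
            simp [ht, List.drop_drop]; congr 1; omega
          rw [htake, hdrop2]
          simp
    · rw [pvLoopA]
      simp only [if_neg hlt]
      have : k = s.length := by omega
      simp [this, pvScan]

theorem pvAlt_eq_scan (html : String) (start : Int) (h0 : 0 ≤ start) :
    ((PySem.Chars.slice html.toList (some start) none).foldl pvStepB ([], none)).1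
      = pvScan (html.toList.drop start.toNat) none := by
  rw [PySem.Chars.slice_eq_listSlice, PySem.List.slice_from _ h0]
  exact pvFoldB_eq _ [] none

-- ===== VERDICT (by name: the statement is the Claim_ definition above) =====
theorem Hita_taggar_med_position_spec : Claim_equal_Hita_taggar_med_position := by
  intro html _
  unfold Spec_Hita_taggar_med_position Hita_taggar_med_position Hita_taggar_med_position_alt
  by_cases h : PySem.Chars.find html.toList "<body".toList ≠ -1
  · simp only [if_pos h]
    have h0 : 0 ≤ PySem.Chars.find html.toList "<body".toList := by
      have := PySem.Chars.neg_one_le_find (s := html.toList) (sub := "<body".toList)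
      omega
    have hle : PySem.Chars.find html.toList "<body".toList ≤ (html.toList.length : Int) :=
      PySem.Chars.find_le_length _ _
    rw [pvAlt_eq_scan html _ h0]
    rw [show PySem.Chars.find html.toList "<body".toList
        = (((PySem.Chars.find html.toList "<body".toList).toNat : Nat) : Int) from by omega]
    rw [pvLoopA_eq html.toList (html.toList.length + 1) _ [] (by omega) (by omega)]
    simp only [Int.toNat_natCast, List.nil_append]
  · simp only [if_neg h]
    rw [pvAlt_eq_scan html 0 (by omega)]
    rw [show (0 : Int) = ((0 : Nat) : Int) from rfl]
    rw [pvLoopA_eq html.toList (html.toList.length + 1) 0 [] (by omega) (by omega)]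
    simp
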